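-- pv_equiv track=rewrite | github.com/mrbesher/jyu-restaurants-bot | halal_app.py | normalize_diet
-- ===== SOURCE A (Python) =====
-- def normalize_diet(diet: str) -> str:
--     diet_mapping = {
--         "VEG": {"VEG", "VEGAN", "VEGAANI", "VEGAANINEN", "VEGETAARINEN", "VEGETARIAN"},
--         "L": {"L", "LAKTOOSITON"},
--         "G": {"G", "GLUTEENITON"},
--         "M": {"M", "MAIDOTON"},
--     }
--
--     upper_diet = diet.upper()
--     for normalized, variations in diet_mapping.items():
--         if any(upper_diet.startswith(v) for v in variations):
--             return normalized
--     return upper_diet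
-- ===== SOURCE B (Python) =====
-- def normalize_diet(diet: str) -> str:
--     u = diet.upper()
--     if u.startswith("VEG"):
--         return "VEG"
--     if u and u[0] in "LGM":
--         return u[0]
--     return u
-- ===== Notes on version B (the rewrite author's own statement) =====
-- stated objective: simpler
-- what changed: Replaced the dict-of-sets table and the search loop over all variations with three direct tests on the uppercased string (a 'VEG' prefix test, then a first-letter test for L/G/M), exploiting that every variation of a category starts with that category's code.
import Mathlib
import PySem

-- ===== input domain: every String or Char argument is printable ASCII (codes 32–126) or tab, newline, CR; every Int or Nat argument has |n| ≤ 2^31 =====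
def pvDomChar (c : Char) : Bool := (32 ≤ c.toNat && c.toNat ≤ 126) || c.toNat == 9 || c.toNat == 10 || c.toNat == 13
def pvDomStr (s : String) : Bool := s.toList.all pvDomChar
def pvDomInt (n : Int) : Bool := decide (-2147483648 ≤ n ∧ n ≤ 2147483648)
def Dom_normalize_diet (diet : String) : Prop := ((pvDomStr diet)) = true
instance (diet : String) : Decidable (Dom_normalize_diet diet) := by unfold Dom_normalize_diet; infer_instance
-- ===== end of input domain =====

-- B replaces A's variation table and search loop with direct prefix/first-letter tests (simpler).

-- ===== PORT A =====
-- the dict of sets, in insertion order; set iteration order does not affect 'any'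
def nd_mapping : List (String × List String) :=
  [("VEG", ["VEG", "VEGAN", "VEGAANI", "VEGAANINEN", "VEGETAARINEN", "VEGETARIAN"]),
   ("L",   ["L", "LAKTOOSITON"]),
   ("G",   ["G", "GLUTEENITON"]),
   ("M",   ["M", "MAIDOTON"])]

-- the 'for normalized, variations in diet_mapping.items(): if any(...): return ...' loop
def nd_loop (u : String) : List (String × List String) → String
  | [] => u
  | (normalized, variations) :: rest =>
      if variations.any (fun v => PySem.Str.startswith u v) then normalized
      else nd_loop u rest

def normalize_diet (diet : String) : String :=
  let upper_diet := PySem.Str.upper diet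
  nd_loop upper_diet nd_mapping

-- ===== PORT B =====
def normalize_diet_alt (diet : String) : String :=
  let u := PySem.Str.upper diet
  if PySem.Str.startswith u "VEG" then "VEG"
  else
    match u.toList with   -- 'if u and u[0] in "LGM": return u[0]'
    | c :: _ => if c = 'L' ∨ c = 'G' ∨ c = 'M' then String.ofList [c] else u
    | [] => u

-- ===== PRECONDITION & SPEC =====
def Spec_normalize_diet (diet : String) (out : String) : Prop := out = normalize_diet_alt diet
instance (diet : String) (out : String) : Decidable (Spec_normalize_diet diet out) := by unfold Spec_normalize_diet; infer_instance

-- ===== CLAIM (what is proved, stated in full; the proofs are below) =====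
def Claim_equal_normalize_diet : Prop := ∀ (diet : String), Dom_normalize_diet diet → Spec_normalize_diet diet (normalize_diet diet)

-- ===== LEMMAS AND PROOFS =====

-- a shorter prefix survives: if q starts l and p starts q then p starts l
theorem nd_sw_trans {l p q : List Char} (hpq : p <+: q)
    (h : PySem.Chars.startswith l q = true) : PySem.Chars.startswith l p = true := by
  rw [PySem.Chars.startswith_iff] at h ⊢
  exact hpq.trans h

-- a matching variation forces the first character
theorem nd_sw_head {l : List Char} {c : Char} {v : List Char} (hv : v.head? = some c)
    (h : PySem.Chars.startswith l v = true) : l.head? = some c := by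
  rw [PySem.Chars.startswith_iff] at h
  obtain ⟨t, ht⟩ := h
  cases v with
  | nil => simp at hv
  | cons d rest => simp at hv; rw [← ht, hv]; rfl

theorem normalize_diet_spec' (diet : String) : normalize_diet diet = normalize_diet_alt diet := by
  unfold normalize_diet normalize_diet_alt nd_mapping
  simp only [nd_loop]
  set u := PySem.Str.upper diet with hu
  simp only [List.any_cons, List.any_nil, PySem.Str.startswith_eq,
    show ("VEG":String).toList = ['V', 'E', 'G'] from rfl,
    show ("VEGAN":String).toList = ['V', 'E', 'G', 'A', 'N'] from rfl,
    show ("VEGAANI":String).toList = ['V', 'E', 'G', 'A', 'A', 'N', 'I'] from rfl,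
    show ("VEGAANINEN":String).toList = ['V', 'E', 'G', 'A', 'A', 'N', 'I', 'N', 'E', 'N'] from rfl,
    show ("VEGETAARINEN":String).toList = ['V', 'E', 'G', 'E', 'T', 'A', 'A', 'R', 'I', 'N', 'E', 'N'] from rfl,
    show ("VEGETARIAN":String).toList = ['V', 'E', 'G', 'E', 'T', 'A', 'R', 'I', 'A', 'N'] from rfl,
    show ("L":String).toList = ['L'] from rfl,
    show ("LAKTOOSITON":String).toList = ['L', 'A', 'K', 'T', 'O', 'O', 'S', 'I', 'T', 'O', 'N'] from rfl,
    show ("G":String).toList = ['G'] from rfl,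
    show ("GLUTEENITON":String).toList = ['G', 'L', 'U', 'T', 'E', 'E', 'N', 'I', 'T', 'O', 'N'] from rfl,
    show ("M":String).toList = ['M'] from rfl,
    show ("MAIDOTON":String).toList = ['M', 'A', 'I', 'D', 'O', 'T', 'O', 'N'] from rfl,
    Bool.or_false]
  by_cases hveg : PySem.Chars.startswith u.toList ['V', 'E', 'G'] = true
  · simp only [hveg, Bool.true_or, if_true]
  · rw [Bool.not_eq_true] at hveg
    have hv : ∀ q : List Char, (['V', 'E', 'G'] : List Char) <+: q →
        PySem.Chars.startswith u.toList q = false := by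
      intro q hq
      cases h : PySem.Chars.startswith u.toList q with
      | false => rfl
      | true => rw [nd_sw_trans hq h] at hveg; exact absurd hveg (by simp)
    rw [hveg,
      hv ['V', 'E', 'G', 'A', 'N'] (by decide),
      hv ['V', 'E', 'G', 'A', 'A', 'N', 'I'] (by decide),
      hv ['V', 'E', 'G', 'A', 'A', 'N', 'I', 'N', 'E', 'N'] (by decide),
      hv ['V', 'E', 'G', 'E', 'T', 'A', 'A', 'R', 'I', 'N', 'E', 'N'] (by decide),
      hv ['V', 'E', 'G', 'E', 'T', 'A', 'R', 'I', 'A', 'N'] (by decide)]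
    simp only [Bool.or_self, Bool.false_eq_true, if_false]
    cases hl : u.toList with
    | nil =>
      simp [PySem.Chars.startswith]
    | cons c t =>
      have hsingle : ∀ d : Char, PySem.Chars.startswith (c :: t) [d] = (d == c) := by
        intro d; simp [PySem.Chars.startswith, List.isPrefixOf]
      have hlong : ∀ (d : Char) (rest : List Char), c ≠ d →
          PySem.Chars.startswith (c :: t) (d :: rest) = false := by
        intro d rest hne
        cases h : PySem.Chars.startswith (c :: t) (d :: rest) with
        | false => rfl
        | true =>
          have := nd_sw_head (v := d :: rest) rfl h
          simp at this; exact absurd this hne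
      by_cases hL : c = 'L'
      · subst hL; simp [hsingle]
      · rw [hsingle, hlong 'L' _ hL]
        by_cases hG : c = 'G'
        · subst hG; simp [hsingle]
        · rw [hsingle, hlong 'G' _ hG]
          by_cases hM : c = 'M'
          · subst hM; simp [hsingle]
          · rw [hsingle, hlong 'M' _ hM]
            simp [hL, hG, hM, Ne.symm hL, Ne.symm hG, Ne.symm hM]

-- ===== VERDICT (by name: the statement is the Claim_ definition above) =====
theorem normalize_diet_spec : Claim_equal_normalize_diet := by
  intro diet _
  exact normalize_diet_spec' diet
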